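-- pv_equiv track=rewrite | github.com/yskim3271/BAFNet-plus | src/compute_rf.py | compute_mask_decoder_rf
-- ===== SOURCE A (Python) =====
-- from typing import Dict, List, Tuple, Optional
--
-- def compute_conv_rf(rf_in: int, kernel: int, stride: int = 1, dilation: int = 1) -> Tuple[int, int]:
--     """
--     Compute receptive field after a convolution layer.
--
--     Args:
--         rf_in: Input receptive field size
--         kernel: Kernel size
--         stride: Stride (default: 1)
--         dilation: Dilation rate (default: 1)
--
--     Returns:
--         Tuple of (rf_out, stride_cumulative)
--
--     Formula:
--         rf_out = rf_in + (kernel - 1) * dilation * stride_cumulative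
--     """
--     # For single layer: stride_cumulative is just stride
--     # RF increases by the effective kernel size
--     effective_kernel = (kernel - 1) * dilation
--     rf_out = rf_in + effective_kernel
--     return rf_out, stride
--
-- def compute_mask_decoder_rf(depth: int, padding_ratio: Tuple[float, float] = (0.5, 0.5)) -> Dict[str, int]:
--     """
--     Compute receptive field for MaskDecoder block.
--
--     MaskDecoder structure:
--       1. Conv2d(dense, dense, (1,2)) - freq upsampling
--       2. DS_DDB (depth layers):
--          - Each layer: Dilated Conv2d(*, *, (3,3), dilation=2^i)
--          - Layer i uses dilation = 2^i (1, 2, 4, 8 for depth=4)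
--       3. Conv2d(dense, out, (1,1)) - no RF change
--
--     Args:
--         depth: Number of DS_DDB layers
--         padding_ratio: (left_ratio, right_ratio) for asymmetric padding
--
--     Returns:
--         Dictionary with 'time' and 'freq' receptive fields
--
--     Example (depth=4):
--         Same as DenseEncoder: RF = 31 frames
--     """
--     rf_time = 1
--     rf_freq = 1
--
--     # Conv2d(dense, dense, (1,2)) - freq upsampling
--     # Time: kernel=1, no change
--     # Freq: kernel=2, stride=1
--     rf_freq, _ = compute_conv_rf(rf_freq, kernel=2)
--
--     # DS_DDB block: depth layers of dilated (3,3) convolutions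
--     for i in range(depth):
--         dilation_time = 2 ** i  # 1, 2, 4, 8, ...
--         # Time axis: dilated convolution
--         rf_time, _ = compute_conv_rf(rf_time, kernel=3, dilation=dilation_time)
--         # Freq axis: no dilation (dilation=1)
--         rf_freq, _ = compute_conv_rf(rf_freq, kernel=3, dilation=1)
--
--     # Conv2d(dense, out, (1,1)) - no change
--
--     return {'time': rf_time, 'freq': rf_freq}
-- ===== SOURCE B (Python) =====
-- def compute_mask_decoder_rf(depth, padding_ratio=(0.5, 0.5)):
--     # Closed form: freq grows by 2 per layer (+ initial (1,2) conv), time rf is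
--     # 1 + sum_{i<n} 2*2^i = 2^(n+1) - 1, with n = max(depth, 0) (empty loop for depth<=0).
--     n = max(depth, 0)
--     return {'time': 2 ** (n + 1) - 1, 'freq': 2 + 2 * n}
-- ===== Notes on version B (the rewrite author's own statement) =====
-- stated objective: faster
-- what changed: Replaced the per-layer receptive-field loop by the closed form rf_time = 2^(max(depth,0)+1) - 1, rf_freq = 2 + 2*max(depth,0), an O(1)-step computation.
import Mathlib
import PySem

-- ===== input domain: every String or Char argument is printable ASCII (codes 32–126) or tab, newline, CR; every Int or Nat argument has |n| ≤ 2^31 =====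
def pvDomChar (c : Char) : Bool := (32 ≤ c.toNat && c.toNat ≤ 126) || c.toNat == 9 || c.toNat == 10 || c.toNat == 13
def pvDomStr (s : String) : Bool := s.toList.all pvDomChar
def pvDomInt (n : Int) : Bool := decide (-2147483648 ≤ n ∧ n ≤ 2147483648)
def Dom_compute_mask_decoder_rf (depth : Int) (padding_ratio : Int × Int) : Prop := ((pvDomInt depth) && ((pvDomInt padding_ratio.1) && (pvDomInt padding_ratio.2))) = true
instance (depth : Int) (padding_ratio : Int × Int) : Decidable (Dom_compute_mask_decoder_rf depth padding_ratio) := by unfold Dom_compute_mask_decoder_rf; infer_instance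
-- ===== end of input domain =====

-- B replaces A's per-layer receptive-field loop by the closed form
-- rf_time = 2^(max(depth,0)+1) - 1, rf_freq = 2 + 2*max(depth,0)  (objective: simpler).


-- ===== PORT A =====
def compute_conv_rf (rf_in : Int) (kernel : Int) (stride : Int) (dilation : Int) : Int × Int :=
  let effective_kernel := (kernel - 1) * dilation
  let rf_out := rf_in + effective_kernel
  (rf_out, stride)

def compute_mask_decoder_rf (depth : Int) (padding_ratio : Int × Int) : List (String × Int) :=
  let rf_time : Int := 1
  let rf_freq : Int := 1
  let rf_freq := (compute_conv_rf rf_freq 2 1 1).1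
  -- for i in range(depth): i is nonnegative inside the range, so 2**i = 2 ^ i.toNat
  let s := (PySem.List.pyRange 0 depth 1).foldl
    (fun (s : Int × Int) i =>
      ((compute_conv_rf s.1 3 1 (2 ^ i.toNat)).1, (compute_conv_rf s.2 3 1 1).1))
    (rf_time, rf_freq)
  [("time", s.1), ("freq", s.2)]

-- ===== PORT B =====
def compute_mask_decoder_rf_alt (depth : Int) (padding_ratio : Int × Int) : List (String × Int) :=
  let n := max depth 0
  [("time", 2 ^ (n.toNat + 1) - 1), ("freq", 2 + 2 * n)]

-- ===== PRECONDITION & SPEC =====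
def Spec_compute_mask_decoder_rf (depth : Int) (padding_ratio : Int × Int) (out : List (String × Int)) : Prop := out = compute_mask_decoder_rf_alt depth padding_ratio
instance (depth : Int) (padding_ratio : Int × Int) (out : List (String × Int)) : Decidable (Spec_compute_mask_decoder_rf depth padding_ratio out) := by unfold Spec_compute_mask_decoder_rf; infer_instance

-- ===== CLAIM (what is proved, stated in full; the proofs are below) =====
def Claim_equal_compute_mask_decoder_rf : Prop := ∀ (depth : Int) (padding_ratio : Int × Int), Dom_compute_mask_decoder_rf depth padding_ratio → Spec_compute_mask_decoder_rf depth padding_ratio (compute_mask_decoder_rf depth padding_ratio)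

-- ===== LEMMAS AND PROOFS =====

-- The loop state after n iterations: time = 2^(n+1) - 1, freq = 2 + 2n.
theorem pv_loop_closed (n : Nat) :
    (PySem.List.pyRange 0 (n : Int) 1).foldl
      (fun (s : Int × Int) i =>
        ((compute_conv_rf s.1 3 1 (2 ^ i.toNat)).1, (compute_conv_rf s.2 3 1 1).1))
      (1, 2)
    = (2 ^ (n + 1) - 1, 2 + 2 * (n : Int)) := by
  induction n with
  | zero => simp [PySem.List.pyRange_one_eq_nil]
  | succ m ih =>
    have h : ((m : Int) + 1) = ((m + 1 : Nat) : Int) := by push_cast; ring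
    rw [← h, PySem.List.pyRange_one_succ_right (by positivity), List.foldl_append, ih]
    simp [compute_conv_rf]
    constructor
    · ring
    · ring

-- ===== VERDICT (by name: the statement is the Claim_ definition above) =====
theorem compute_mask_decoder_rf_spec : Claim_equal_compute_mask_decoder_rf := by
  intro depth padding_ratio _
  unfold Spec_compute_mask_decoder_rf compute_mask_decoder_rf compute_mask_decoder_rf_alt
  rcases le_or_gt depth 0 with hle | hpos
  · rw [PySem.List.pyRange_one_eq_nil hle]
    simp [compute_conv_rf, max_eq_right hle]
  · have hd : depth = ((depth.toNat : Nat) : Int) := (Int.toNat_of_nonneg hpos.le).symm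
    rw [hd]
    show [("time", ((PySem.List.pyRange 0 ((depth.toNat : Nat) : Int) 1).foldl
      (fun (s : Int × Int) i =>
        ((compute_conv_rf s.1 3 1 (2 ^ i.toNat)).1, (compute_conv_rf s.2 3 1 1).1))
      (1, (compute_conv_rf 1 2 1 1).1)).1), ("freq", _)] = _
    have h2 : (compute_conv_rf 1 2 1 1).1 = 2 := by simp [compute_conv_rf]
    rw [h2, pv_loop_closed depth.toNat]
    simp
    omega
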